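-- pv_equiv track=rewrite | github.com/Dioclei/LeetCode | python/56_merge_intervals.py | compute_connected_graph
-- ===== SOURCE A (Python) =====
-- def compute_connected_graph(graph, key):
--     # traverse each connected component with dfs
--     stack = list(graph[key])
--     visited = set()
--     while (len(stack) > 0):
--         item = stack.pop()
--         if item in visited:
--             continue
--         # visit item
--         visited.add(item)
--         # add item's neighbours to stack
--         for other in graph[item]:
--             stack.append(other)
--     return list(visited)
-- ===== SOURCE B (Python) =====
-- def compute_connected_graph(graph, key):
--     # iterative DFS over an explicit stack of FRAMES (one frame per visited node,
--     # consumed head-first), instead of one flat stack popped from the end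
--     visited = set()
--     frames = [list(reversed(graph[key]))]
--     while frames:
--         frame = frames[-1]
--         if not frame:
--             frames.pop()
--         else:
--             node = frame.pop(0)
--             if node not in visited:
--                 visited.add(node)
--                 frames.append(list(reversed(graph[node])))
--     return list(visited)
-- ===== Notes on version B (the rewrite author's own statement) =====
-- stated objective: alternative
-- what changed: A's single flat worklist (pop from the end, push all neighbours back on) is replaced by a stack of per-node frames: visiting a node pushes one frame holding its (reversed) adjacency list, and the topmost frame is consumed head-first and discarded when empty - the iterative form of recursive DFS; the same nodes are visited in the same sequence, so the visited set and the returned list are identical.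
import Mathlib
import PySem

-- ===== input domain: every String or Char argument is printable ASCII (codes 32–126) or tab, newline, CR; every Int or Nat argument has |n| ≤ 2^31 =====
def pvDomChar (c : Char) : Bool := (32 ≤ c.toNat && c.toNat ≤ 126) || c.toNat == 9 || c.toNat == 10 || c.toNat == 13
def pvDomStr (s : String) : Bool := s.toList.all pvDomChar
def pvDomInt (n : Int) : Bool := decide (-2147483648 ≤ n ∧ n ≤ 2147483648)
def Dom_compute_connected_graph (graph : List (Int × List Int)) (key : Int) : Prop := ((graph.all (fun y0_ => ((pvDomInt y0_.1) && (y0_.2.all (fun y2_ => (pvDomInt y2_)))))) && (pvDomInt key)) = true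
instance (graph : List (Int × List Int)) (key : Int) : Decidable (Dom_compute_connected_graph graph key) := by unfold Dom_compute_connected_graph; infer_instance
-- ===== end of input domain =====

-- B replaces A's single flat worklist (popped from the end, all neighbours pushed) by a stack of
-- per-node frames consumed head-first (the iterative form of recursive DFS): same cost, different
-- decomposition; the visited set is built by the very same insertions, so the returned list is equal.

-- ===== PORT A =====
-- total adjacency size, used only to give the while-loop's fuel (each pushed element comes from one adjacency list)
def pvSumAdj (graph : List (Int × List Int)) : Nat := (graph.map (fun p => p.2.length)).sum

-- the while-loop of A: pop from the end of `stack`, skip visited, else visit and append neighbours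
def pvLoopA (graph : List (Int × List Int)) : Nat → List Int → PySem.Set Int → PySem.Set Int
  | 0, _, v => v
  | f + 1, stack, v =>
    match PySem.List.pop? stack with
    | none => v
    | some (item, rest) =>
      if PySem.Set.contains v item then pvLoopA graph f rest v
      else
        match PySem.Dict.get? (PySem.Dict.mk graph) item with
        | none => PySem.Set.add v item  -- Python raises KeyError at graph[item]; excluded by Pre_
        | some ns => pvLoopA graph f (rest ++ ns) (PySem.Set.add v item)

def compute_connected_graph (graph : List (Int × List Int)) (key : Int) : List Int :=
  match PySem.Dict.get? (PySem.Dict.mk graph) key with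
  | none => []  -- Python raises KeyError at graph[key]; excluded by Pre_
  | some seed =>
      pvLoopA graph ((graph.length + 1) * (pvSumAdj graph + 1) + seed.length + 1) seed PySem.Set.empty

-- ===== PORT B =====
-- termination helpers for B's frame machine: number of (distinct) keys of `graph` not yet visited,
-- and the total size of the pending frames (a lexicographic measure)
def pvUnvis (graph : List (Int × List Int)) (v : PySem.Set Int) : Nat :=
  ((PySem.List.dedup (graph.map Prod.fst)).filter (fun k => !(PySem.Set.contains v k))).length

def pvFsize (fs : List (List Int)) : Nat := (fs.map (fun l => l.length + 1)).sum

-- cited by `decreasing_by` of the frame machine below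
lemma pvUnvis_add_lt (graph : List (Int × List Int)) {v : PySem.Set Int} {x : Int} {ns : List Int}
    (hnv : ¬ PySem.Set.contains v x = true)
    (hx : PySem.Dict.get? (PySem.Dict.mk graph) x = some ns) :
    pvUnvis graph (PySem.Set.add v x) < pvUnvis graph v := by
  have hxk : x ∈ graph.map Prod.fst := by
    have := (PySem.Dict.get?_eq_none_iff_not_mem_keys (PySem.Dict.mk graph) x)
    by_contra hmem
    have : PySem.Dict.get? (PySem.Dict.mk graph) x = none := by
      rw [this]; simpa [PySem.Dict.keys_mk] using hmem
    simp [this] at hx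
  have hxd : x ∈ PySem.List.dedup (graph.map Prod.fst) :=
    (PySem.List.mem_dedup _ _).mpr hxk
  unfold pvUnvis
  have hsub : ((PySem.List.dedup (graph.map Prod.fst)).filter
      (fun k => !(PySem.Set.contains (PySem.Set.add v x) k))) =
      (((PySem.List.dedup (graph.map Prod.fst)).filter
        (fun k => !(PySem.Set.contains v k))).filter (fun k => !(k == x))) := by
    rw [List.filter_filter]
    apply List.filter_congr
    intro k _
    by_cases hk : k = x
    · subst hk
      have hck : PySem.Set.contains (PySem.Set.add v k) k = true :=
        (PySem.Set.contains_iff _ _).mpr ((PySem.Set.mem_add _ _ _).mpr (Or.inr rfl))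
      rw [hck]; simp
    · have hmem : k ∈ PySem.Set.add v x ↔ k ∈ v := by
        rw [PySem.Set.mem_add]; tauto
      have hcc : PySem.Set.contains (PySem.Set.add v x) k = PySem.Set.contains v k := by
        rw [Bool.eq_iff_iff, PySem.Set.contains_iff, PySem.Set.contains_iff]
        exact hmem
      rw [hcc]; simp [hk]
  rw [hsub]
  apply (List.length_filter_lt_length_iff_exists).mpr
  refine ⟨x, ?_, by simp⟩
  simp only [List.mem_filter]
  exact ⟨hxd, by simpa using hnv⟩

-- B's while-loop: the topmost frame is consumed head-first; visiting a node pushes one new frame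
def pvFramesB (graph : List (Int × List Int)) : List (List Int) → PySem.Set Int → PySem.Set Int
  | [], v => v
  | [] :: fs, v => pvFramesB graph fs v
  | (x :: xs) :: fs, v =>
    if hc : PySem.Set.contains v x = true then pvFramesB graph (xs :: fs) v
    else
      match h : PySem.Dict.get? (PySem.Dict.mk graph) x with
      | none => PySem.Set.add v x  -- Python adds node, then raises KeyError at graph[node]; excluded by Pre_
      | some ns => pvFramesB graph (ns.reverse :: xs :: fs) (PySem.Set.add v x)
  termination_by fs v => (pvUnvis graph v, pvFsize fs)
  decreasing_by
  · apply Prod.Lex.right; simp [pvFsize]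
  · apply Prod.Lex.right; simp [pvFsize]
  · apply Prod.Lex.left; exact pvUnvis_add_lt graph hc h

def compute_connected_graph_alt (graph : List (Int × List Int)) (key : Int) : List Int :=
  match PySem.Dict.get? (PySem.Dict.mk graph) key with
  | none => []  -- Python raises KeyError at graph[key]; excluded by Pre_
  | some seed => pvFramesB graph [seed.reverse] PySem.Set.empty

-- ===== PRECONDITION & SPEC =====
-- Pre_ = exactly the inputs where A returns (no KeyError): key has an entry and SOME subset S of the
-- keys contains graph[key] and is closed under adjacency — then every node the traversal reaches has
-- an entry.  (Equivalently: every node reachable from graph[key] is a key of graph.)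
def Pre_compute_connected_graph (graph : List (Int × List Int)) (key : Int) : Prop :=
  PySem.Dict.contains (PySem.Dict.mk graph) key = true ∧
  ∃ S ∈ (graph.map Prod.fst).sublists,
    (∀ x ∈ PySem.Dict.getD (PySem.Dict.mk graph) key [], x ∈ S) ∧
    (∀ n ∈ S, ∀ x ∈ PySem.Dict.getD (PySem.Dict.mk graph) n [], x ∈ S)
instance (graph : List (Int × List Int)) (key : Int) : Decidable (Pre_compute_connected_graph graph key) := by unfold Pre_compute_connected_graph; infer_instance

def pvWitness_compute_connected_graph : (List (Int × List Int)) × Int := ([(1, [2]), (2, [1]), (3, [7])], 1)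

def Spec_compute_connected_graph (graph : List (Int × List Int)) (key : Int) (out : List Int) : Prop := out = compute_connected_graph_alt graph key
instance (graph : List (Int × List Int)) (key : Int) (out : List Int) : Decidable (Spec_compute_connected_graph graph key out) := by unfold Spec_compute_connected_graph; infer_instance

-- ===== CLAIM (what is proved, stated in full; the proofs are below) =====
def Claim_equal_compute_connected_graph : Prop := ∀ (graph : List (Int × List Int)) (key : Int), Dom_compute_connected_graph graph key → Pre_compute_connected_graph graph key → Spec_compute_connected_graph graph key (compute_connected_graph graph key)

-- ===== LEMMAS AND PROOFS =====

lemma pvUnvis_le (graph : List (Int × List Int)) (v : PySem.Set Int) :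
    pvUnvis graph v ≤ graph.length := by
  calc ((PySem.List.dedup (graph.map Prod.fst)).filter _).length
      ≤ (PySem.List.dedup (graph.map Prod.fst)).length := List.length_filter_le _ _
    _ ≤ (graph.map Prod.fst).length := by
        simpa using PySem.Set.length_ofList_le (graph.map Prod.fst)
    _ = graph.length := List.length_map ..

-- equation lemmas for B's frame machine
lemma pvFramesB_nil (g : List (Int × List Int)) (v : PySem.Set Int) : pvFramesB g [] v = v := by
  rw [pvFramesB]

lemma pvFramesB_nilframe (g : List (Int × List Int)) (fs : List (List Int)) (v : PySem.Set Int) :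
    pvFramesB g ([] :: fs) v = pvFramesB g fs v := by
  rw [pvFramesB]

lemma pvFramesB_skip (g : List (Int × List Int)) {v : PySem.Set Int} {x : Int}
    (xs : List Int) (fs : List (List Int)) (hc : PySem.Set.contains v x = true) :
    pvFramesB g ((x :: xs) :: fs) v = pvFramesB g (xs :: fs) v := by
  rw [pvFramesB, dif_pos hc]

lemma pvFramesB_none (g : List (Int × List Int)) {v : PySem.Set Int} {x : Int}
    (xs : List Int) (fs : List (List Int)) (hc : ¬ PySem.Set.contains v x = true)
    (h : PySem.Dict.get? (PySem.Dict.mk g) x = none) :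
    pvFramesB g ((x :: xs) :: fs) v = PySem.Set.add v x := by
  rw [pvFramesB, dif_neg hc, h]

lemma pvFramesB_visit (g : List (Int × List Int)) {v : PySem.Set Int} {x : Int} {ns : List Int}
    (xs : List Int) (fs : List (List Int)) (hc : ¬ PySem.Set.contains v x = true)
    (h : PySem.Dict.get? (PySem.Dict.mk g) x = some ns) :
    pvFramesB g ((x :: xs) :: fs) v = pvFramesB g (ns.reverse :: xs :: fs) (PySem.Set.add v x) := by
  rw [pvFramesB, dif_neg hc, h]

-- the result of the frame machine depends only on the concatenation of its frames
lemma pvFramesB_flatten (g : List (Int × List Int)) :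
    ∀ (u : Nat) (v : PySem.Set Int), pvUnvis g v < u →
    ∀ (k : Nat) (fs : List (List Int)), pvFsize fs < k →
    pvFramesB g fs v = pvFramesB g [fs.flatten] v := by
  intro u
  induction u with
  | zero => intro v hv; omega
  | succ u ihu =>
    intro v hv k
    induction k generalizing v with
    | zero => intro fs hfs; omega
    | succ k ihk =>
      intro fs hfs
      match fs with
      | [] => rw [pvFramesB_nil]; simp [pvFramesB_nilframe, pvFramesB_nil]
      | [] :: fs =>
        rw [pvFramesB_nilframe]
        have : pvFsize fs < k := by simp [pvFsize] at hfs ⊢; omega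
        rw [ihk v hv fs this]; simp
      | (x :: xs) :: fs =>
        have hflat : ((x :: xs) :: fs).flatten = x :: (xs ++ fs.flatten) := by simp
        by_cases hc : PySem.Set.contains v x = true
        · rw [pvFramesB_skip g xs fs hc, hflat, pvFramesB_skip g (xs ++ fs.flatten) [] hc]
          have hsz : pvFsize (xs :: fs) < k := by simp [pvFsize] at hfs ⊢; omega
          rw [ihk v hv (xs :: fs) hsz]; simp
        · cases hget : PySem.Dict.get? (PySem.Dict.mk g) x with
          | none =>
            rw [pvFramesB_none g xs fs hc hget, hflat,
              pvFramesB_none g (xs ++ fs.flatten) [] hc hget]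
          | some ns =>
            rw [pvFramesB_visit g xs fs hc hget, hflat,
              pvFramesB_visit g (xs ++ fs.flatten) [] hc hget]
            have hlt : pvUnvis g (PySem.Set.add v x) < u := by
              have := pvUnvis_add_lt g hc hget; omega
            rw [ihu (PySem.Set.add v x) hlt (pvFsize (ns.reverse :: xs :: fs) + 1)
              (ns.reverse :: xs :: fs) (by omega),
              ihu (PySem.Set.add v x) hlt (pvFsize (ns.reverse :: (xs ++ fs.flatten) :: []) + 1)
              (ns.reverse :: (xs ++ fs.flatten) :: []) (by omega)]
            simp

-- A's while-loop, given enough fuel, is the frame machine on the reversed stack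
lemma pvLoopA_eq_framesB (g : List (Int × List Int)) (S : List Int)
    (hS : ∀ n ∈ S, ∃ ns, PySem.Dict.get? (PySem.Dict.mk g) n = some ns ∧ ∀ x ∈ ns, x ∈ S) :
    ∀ (f : Nat) (s : List Int) (v : PySem.Set Int), (∀ x ∈ s, x ∈ S) →
    pvUnvis g v * (pvSumAdj g + 1) + s.length + 1 ≤ f →
    pvLoopA g f s v = pvFramesB g [s.reverse] v := by
  intro f
  induction f with
  | zero => intro s v _ hf; omega
  | succ f ih =>
    intro s v hs hf
    cases hrev : s.reverse with
    | nil =>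
      have hnil : s = [] := by simpa using hrev
      subst hnil
      rw [pvLoopA, show PySem.List.pop? ([] : List Int) = none from by simp [PySem.List.pop?]]
      rw [pvFramesB_nilframe, pvFramesB_nil]
    | cons x t =>
      obtain rfl : s = t.reverse ++ [x] := List.reverse_eq_cons_iff.mp hrev
      have hxS : x ∈ S := hs x (by simp)
      have htS : ∀ z ∈ t.reverse, z ∈ S := fun z hz => hs z (by simp [hz])
      by_cases hc : PySem.Set.contains v x = true
      · rw [pvLoopA, PySem.List.pop?_last]
        dsimp only
        rw [if_pos hc]
        rw [ih t.reverse v htS (by simp only [List.length_append, List.length_reverse,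
          List.length_cons, List.length_nil] at hf ⊢; omega)]
        rw [pvFramesB_skip g t [] hc]
        simp
      · obtain ⟨ns, hget, hns⟩ := hS x hxS
        rw [pvLoopA, PySem.List.pop?_last]
        dsimp only
        rw [if_neg hc, hget]
        dsimp only
        -- fuel bookkeeping for the visiting step
        have hlt : pvUnvis g (PySem.Set.add v x) < pvUnvis g v := pvUnvis_add_lt g hc hget
        have hlen : ns.length ≤ pvSumAdj g := by
          have hmem : (x, ns) ∈ g := PySem.Dict.mem_items_of_get?_eq_some _ hget
          have : ns.length ∈ g.map (fun p => p.2.length) := by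
            exact List.mem_map_of_mem hmem
          exact List.single_le_sum (fun _ _ => Nat.zero_le _) _ this
        have hmul : pvUnvis g (PySem.Set.add v x) * (pvSumAdj g + 1) + (pvSumAdj g + 1) ≤
            pvUnvis g v * (pvSumAdj g + 1) := by
          have h1 : pvUnvis g (PySem.Set.add v x) + 1 ≤ pvUnvis g v := hlt
          have := Nat.mul_le_mul_right (pvSumAdj g + 1) h1
          rwa [Nat.succ_mul] at this
        have hf' : pvUnvis g (PySem.Set.add v x) * (pvSumAdj g + 1) +
            (t.reverse ++ ns).length + 1 ≤ f := by
          simp only [List.length_append, List.length_reverse, List.length_cons,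
            List.length_nil] at hf ⊢
          omega
        rw [ih (t.reverse ++ ns) (PySem.Set.add v x)
          (by intro z hz; rcases List.mem_append.mp hz with h | h
              exact htS z h
              exact hns z h) hf']
        rw [pvFramesB_visit g t [] hc hget]
        -- both sides are the machine on the flattened frames
        have h1 := pvFramesB_flatten g (pvUnvis g (PySem.Set.add v x) + 1) (PySem.Set.add v x)
          (by omega) (pvFsize (ns.reverse :: t :: []) + 1) (ns.reverse :: t :: []) (by omega)
        rw [h1]
        simp [List.reverse_append]

-- ===== VERDICT (by name: the statement is the Claim_ definition above) =====
theorem compute_connected_graph_spec : Claim_equal_compute_connected_graph := by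
  intro graph key _ hPre
  unfold Spec_compute_connected_graph
  obtain ⟨hck, S, hSsub, hseed, hclosed⟩ := hPre
  rw [PySem.Dict.contains_eq_isSome_get?] at hck
  obtain ⟨seed, hkeq⟩ := Option.isSome_iff_exists.mp hck
  have hgetD : PySem.Dict.getD (PySem.Dict.mk graph) key [] = seed := by
    rw [PySem.Dict.getD_eq_get?_getD, hkeq]; rfl
  rw [hgetD] at hseed
  have hS : ∀ n ∈ S, ∃ ns, PySem.Dict.get? (PySem.Dict.mk graph) n = some ns ∧
      ∀ x ∈ ns, x ∈ S := by
    intro n hn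
    have hkeys : n ∈ graph.map Prod.fst := (List.mem_sublists.mp hSsub).subset hn
    have hne : PySem.Dict.get? (PySem.Dict.mk graph) n ≠ none := by
      rw [Ne, PySem.Dict.get?_eq_none_iff_not_mem_keys]
      simpa [PySem.Dict.keys_mk] using hkeys
    obtain ⟨ns, hns⟩ := Option.ne_none_iff_exists'.mp hne
    refine ⟨ns, hns, ?_⟩
    have hcl := hclosed n hn
    rw [PySem.Dict.getD_eq_get?_getD, hns] at hcl
    simpa using hcl
  unfold compute_connected_graph compute_connected_graph_alt
  rw [hkeq]
  dsimp only
  have hfuel : pvUnvis graph PySem.Set.empty * (pvSumAdj graph + 1) + seed.length + 1 ≤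
      (graph.length + 1) * (pvSumAdj graph + 1) + seed.length + 1 := by
    have h1 := pvUnvis_le graph PySem.Set.empty
    have h2 := Nat.mul_le_mul_right (pvSumAdj graph + 1) h1
    have h3 : (graph.length + 1) * (pvSumAdj graph + 1) =
        graph.length * (pvSumAdj graph + 1) + (pvSumAdj graph + 1) := Nat.succ_mul _ _
    omega
  exact pvLoopA_eq_framesB graph S hS _ seed PySem.Set.empty hseed hfuel
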